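-- pv_equiv track=rewrite | github.com/sultonmuhajir/cw-7k | Python/7py 2/magical_well.py | magical_well
-- ===== SOURCE A (Python) =====
-- def magical_well(a, b, n):
--    sum = 0
--    while n:
--       sum += a * b
--       a += 1
--       b += 1
--       n -= 1
--    return sum
-- ===== SOURCE B (Python) =====
-- def magical_well(a, b, n):
--     # closed form for sum_{i=0}^{n-1} (a+i)*(b+i)
--     return n*a*b + (a + b) * (n*(n-1)//2) + n*(n-1)*(2*n-1)//6
-- ===== Notes on version B (the rewrite author's own statement) =====
-- stated objective: faster
-- what changed: Replaced the O(n) accumulation loop by the closed-form polynomial sum (using sum-of-i and sum-of-i^2 formulas), computed in O(1).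
import Mathlib
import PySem

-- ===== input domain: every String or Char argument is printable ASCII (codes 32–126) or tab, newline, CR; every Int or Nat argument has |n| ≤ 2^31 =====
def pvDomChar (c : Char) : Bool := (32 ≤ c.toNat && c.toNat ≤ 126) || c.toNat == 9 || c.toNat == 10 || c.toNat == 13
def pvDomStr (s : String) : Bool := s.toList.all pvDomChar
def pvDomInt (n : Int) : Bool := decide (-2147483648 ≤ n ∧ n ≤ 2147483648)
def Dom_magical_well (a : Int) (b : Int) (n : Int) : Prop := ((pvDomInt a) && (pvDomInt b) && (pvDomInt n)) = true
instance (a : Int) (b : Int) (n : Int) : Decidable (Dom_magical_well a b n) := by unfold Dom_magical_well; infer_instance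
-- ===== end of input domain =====

-- B replaces A's O(n) accumulation loop by the closed-form polynomial sum (O(1)); Pre_ excludes n < 0, where A loops forever.


-- ===== PORT A =====
-- A's while-loop: state (sum, a, b), n counts down; fuel = n.toNat (A diverges for n < 0, excluded by Pre_)
def magicalGo (sum a b : Int) : Nat → Int
  | 0 => sum
  | k + 1 => magicalGo (sum + a * b) (a + 1) (b + 1) k

def magical_well (a : Int) (b : Int) (n : Int) : Int := magicalGo 0 a b n.toNat

-- ===== PORT B =====
def magical_well_alt (a : Int) (b : Int) (n : Int) : Int :=
  n * a * b + (a + b) * (PySem.Int.floordiv (n * (n - 1)) 2)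
    + PySem.Int.floordiv (n * (n - 1) * (2 * n - 1)) 6

-- ===== PRECONDITION & SPEC =====
-- A's 'while n:' never terminates for n < 0 (n only decreases), so Pre_ requires 0 ≤ n.
def Pre_magical_well (a : Int) (b : Int) (n : Int) : Prop := 0 ≤ n
instance (a : Int) (b : Int) (n : Int) : Decidable (Pre_magical_well a b n) := by unfold Pre_magical_well; infer_instance
def pvWitness_magical_well : Int × Int × Int := (2, 3, 4)

def Spec_magical_well (a : Int) (b : Int) (n : Int) (out : Int) : Prop := out = magical_well_alt a b n
instance (a : Int) (b : Int) (n : Int) (out : Int) : Decidable (Spec_magical_well a b n out) := by unfold Spec_magical_well; infer_instance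

-- ===== CLAIM (what is proved, stated in full; the proofs are below) =====
def Claim_equal_magical_well : Prop := ∀ (a : Int) (b : Int) (n : Int), Dom_magical_well a b n → Pre_magical_well a b n → Spec_magical_well a b n (magical_well a b n)

-- ===== LEMMAS AND PROOFS =====

theorem magicalGo_six (k : Nat) : ∀ (sum a b : Int),
    6 * magicalGo sum a b k
      = 6 * sum + 6 * k * a * b + 3 * (a + b) * k * (k - 1) + k * (k - 1) * (2 * k - 1) := by
  induction k with
  | zero => intro sum a b; simp [magicalGo]
  | succ m ih =>
    intro sum a b
    have h := ih (sum + a * b) (a + 1) (b + 1)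
    simp only [magicalGo]
    rw [h]
    push_cast
    ring

theorem dvd_two_n (n : Int) : (2 : Int) ∣ n * (n - 1) := by
  have h := Int.even_mul_succ_self (n - 1)
  rcases h with ⟨c, hc⟩
  exact ⟨c, by linarith⟩

theorem dvd_six_n (n : Int) : (6 : Int) ∣ n * (n - 1) * (2 * n - 1) := by
  have : ((n * (n - 1) * (2 * n - 1) : Int) : ZMod 6) = 0 := by
    have h : ∀ m : ZMod 6, m * (m - 1) * (2 * m - 1) = 0 := by decide
    push_cast
    exact h (n : ZMod 6)
  exact (ZMod.intCast_zmod_eq_zero_iff_dvd _ 6).mp this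

theorem alt_six (a b n : Int) :
    6 * magical_well_alt a b n
      = 6 * n * a * b + 3 * (a + b) * (n * (n - 1)) + n * (n - 1) * (2 * n - 1) := by
  unfold magical_well_alt
  rw [PySem.Int.floordiv_eq_ediv_of_pos (a := n * (n - 1)) (by norm_num),
      PySem.Int.floordiv_eq_ediv_of_pos (a := n * (n - 1) * (2 * n - 1)) (by norm_num)]
  have h2 : (n * (n - 1)) / 2 * 2 = n * (n - 1) := Int.ediv_mul_cancel (dvd_two_n n)
  have h6 : (n * (n - 1) * (2 * n - 1)) / 6 * 6 = n * (n - 1) * (2 * n - 1) :=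
    Int.ediv_mul_cancel (dvd_six_n n)
  have h2' : (a + b) * (n * (n - 1) / 2) * 2 = (a + b) * (n * (n - 1)) := by
    rw [mul_assoc, h2]
  linarith [h2', h6]

-- ===== VERDICT (by name: the statement is the Claim_ definition above) =====
theorem magical_well_spec : Claim_equal_magical_well := by
  intro a b n _ hn
  unfold Spec_magical_well
  have hcast : ((n.toNat : Int)) = n := Int.toNat_of_nonneg hn
  have hA : 6 * magical_well a b n
      = 6 * n * a * b + 3 * (a + b) * (n * (n - 1)) + n * (n - 1) * (2 * n - 1) := by
    unfold magical_well
    rw [magicalGo_six n.toNat 0 a b, hcast]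
    ring
  have hB := alt_six a b n
  linarith [hA, hB]
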